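-- pv_equiv track=rewrite | github.com/paulzim/nttv_chatbot_ext | extractors/rank.py | _render_rank_summary
-- ===== SOURCE A (Python) =====
-- from typing import List, Dict, Any, Optional
--
-- def _render_rank_summary(rank_label: str, fields: Dict[str, List[str]]) -> Optional[str]:
--     if not fields:
--         return None
--     order = [
--         "weapon", "weapon kamae", "weapon strikes", "cuts", "draws", "evasions", "weapon spinning",
--         "kamae", "ukemi", "kaiten", "taihenjutsu", "blocking", "striking",
--         "grappling and escapes", "kihon happo", "san shin no kata",
--         "nage waza", "jime waza", "kyusho", "other"
--     ]
--     lines = [f"{rank_label.title()} — key requirements:"]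
--     for f in order:
--         if f in fields and fields[f]:
--             pretty = f.title().replace("And Escapes", "& Escapes").replace("San Shin No Kata", "Sanshin no Kata")
--             vals = "; ".join(fields[f])
--             lines.append(f"- {pretty}: {vals}")
--     return "\n".join(lines)
-- ===== SOURCE B (Python) =====
-- from typing import List, Dict, Optional
--
-- _ORDER = [
--     "weapon", "weapon kamae", "weapon strikes", "cuts", "draws", "evasions", "weapon spinning",
--     "kamae", "ukemi", "kaiten", "taihenjutsu", "blocking", "striking",
--     "grappling and escapes", "kihon happo", "san shin no kata",
--     "nage waza", "jime waza", "kyusho", "other"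
-- ]
--
-- # index built once: field name -> (position in the canonical order, pretty label)
-- _INDEX = {
--     name: (i, name.title().replace("And Escapes", "& Escapes").replace("San Shin No Kata", "Sanshin no Kata"))
--     for i, name in enumerate(_ORDER)
-- }
--
-- def _render_rank_summary(rank_label: str, fields: Dict[str, List[str]]) -> Optional[str]:
--     if not fields:
--         return None
--     kept = sorted(
--         ((_INDEX[k][0], _INDEX[k][1], v) for k, v in fields.items() if k in _INDEX and v),
--         key=lambda t: t[0],
--     )
--     lines = [f"{rank_label.title()} — key requirements:"]
--     for _, pretty, vals in kept:
--         lines.append(f"- {pretty}: {'; '.join(vals)}")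
--     return "\n".join(lines)
-- ===== Notes on version B (the rewrite author's own statement) =====
-- stated objective: alternative
-- what changed: B replaces A's scan over the 20-name order list (a dict lookup per name) with a precomputed name->(position, pretty label) index built once; it filters the fields items through that index and sorts the survivors by their position.
import Mathlib
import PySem

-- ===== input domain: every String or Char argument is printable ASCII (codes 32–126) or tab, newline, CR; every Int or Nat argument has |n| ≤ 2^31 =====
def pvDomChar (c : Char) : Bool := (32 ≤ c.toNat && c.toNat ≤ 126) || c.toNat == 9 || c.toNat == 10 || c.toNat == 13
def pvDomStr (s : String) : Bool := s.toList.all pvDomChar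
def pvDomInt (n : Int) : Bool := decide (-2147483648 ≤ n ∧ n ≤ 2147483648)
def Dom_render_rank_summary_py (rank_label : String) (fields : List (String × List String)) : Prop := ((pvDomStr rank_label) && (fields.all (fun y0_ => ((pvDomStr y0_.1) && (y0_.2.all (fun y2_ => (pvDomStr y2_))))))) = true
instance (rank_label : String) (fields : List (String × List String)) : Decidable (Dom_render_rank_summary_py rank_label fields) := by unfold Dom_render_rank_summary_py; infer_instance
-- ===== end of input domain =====

-- B replaces A's scan over the canonical order list by a precomputed name → (position, pretty label)
-- index: it filters fields through that index and sorts the survivors by position (objective: alternative).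

-- shared helpers (the pretty-printing transforms both Pythons perform identically)

-- str.title(), exact on the ASCII domain (a letter is uppercased iff the previous char is not a letter)
def pyTitleChars : List Char → Bool → List Char
  | [], _ => []
  | c :: cs, prev =>
      (if PySem.Chars.isalpha c then
        (if prev then PySem.Chars.lowerChar c else PySem.Chars.upperChar c)
       else c) :: pyTitleChars cs (PySem.Chars.isalpha c)

def pyTitle (s : String) : String := String.ofList (pyTitleChars s.toList false)

-- dict lookup on the assoc-list representation (first match = Python dict with unique keys)
def pyDictGet? {ν : Type} (d : List (String × ν)) (k : String) : Option ν :=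
  (d.find? (fun p => p.1 == k)).map (fun p => p.2)

def prettyOf (f : String) : String :=
  PySem.Str.replace (PySem.Str.replace (pyTitle f) "And Escapes" "& Escapes") "San Shin No Kata" "Sanshin no Kata"

-- ===== PORT A =====
def rankOrder : List String := [
  "weapon", "weapon kamae", "weapon strikes", "cuts", "draws", "evasions", "weapon spinning",
  "kamae", "ukemi", "kaiten", "taihenjutsu", "blocking", "striking",
  "grappling and escapes", "kihon happo", "san shin no kata",
  "nage waza", "jime waza", "kyusho", "other"]

def render_rank_summary_py (rank_label : String) (fields : List (String × List String)) : Option String :=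
  if fields = [] then none
  else
    let lines : List String := [pyTitle rank_label ++ " — key requirements:"]
    let lines := rankOrder.foldl (fun acc f =>
      match pyDictGet? fields f with
      | some vs => if vs ≠ [] then acc ++ ["- " ++ prettyOf f ++ ": " ++ PySem.Str.join "; " vs] else acc
      | none => acc) lines
    some (PySem.Str.join "\n" lines)

-- ===== PORT B =====
-- the index dict _INDEX : name -> (position, pretty label), built once from enumerate(order)
def rankIndex : List (String × (Int × String)) :=
  (PySem.List.enumerate rankOrder 0).map (fun p => (p.2, (p.1, prettyOf p.2)))

def render_rank_summary_py_alt (rank_label : String) (fields : List (String × List String)) : Option String :=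
  if fields = [] then none
  else
    let kept : List (Int × String × List String) := fields.foldl (fun acc kv =>
      match pyDictGet? rankIndex kv.1 with
      | some ip => if kv.2 ≠ [] then acc ++ [(ip.1, ip.2, kv.2)] else acc
      | none => acc) []
    let kept := PySem.List.sorted kept (fun t => t.1)
    let lines : List String := [pyTitle rank_label ++ " — key requirements:"]
    let lines := kept.foldl (fun acc t =>
      acc ++ ["- " ++ t.2.1 ++ ": " ++ PySem.Str.join "; " t.2.2]) lines
    some (PySem.Str.join "\n" lines)

-- ===== PRECONDITION & SPEC =====
-- Pre_ excludes assoc lists with duplicate keys: they do not represent a Python dict input unambiguously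
-- (Python's dict literal keeps the last value, the assoc-list convention's lookup the first), so A's and
-- B's ports may legitimately disagree there.
def Pre_render_rank_summary_py (rank_label : String) (fields : List (String × List String)) : Prop :=
  (fields.map Prod.fst).Nodup
instance (rank_label : String) (fields : List (String × List String)) : Decidable (Pre_render_rank_summary_py rank_label fields) := by unfold Pre_render_rank_summary_py; infer_instance

def pvWitness_render_rank_summary_py : String × (List (String × List String)) :=
  ("9th kyu", [("kamae", ["ichimonji", "hira"]), ("ukemi", ["zenpo kaiten"])])

def Spec_render_rank_summary_py (rank_label : String) (fields : List (String × List String)) (out : Option String) : Prop := out = render_rank_summary_py_alt rank_label fields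
instance (rank_label : String) (fields : List (String × List String)) (out : Option String) : Decidable (Spec_render_rank_summary_py rank_label fields out) := by unfold Spec_render_rank_summary_py; infer_instance

-- ===== CLAIM (what is proved, stated in full; the proofs are below) =====
def Claim_equal_render_rank_summary_py : Prop := ∀ (rank_label : String) (fields : List (String × List String)), Dom_render_rank_summary_py rank_label fields → Pre_render_rank_summary_py rank_label fields → Spec_render_rank_summary_py rank_label fields (render_rank_summary_py rank_label fields)

-- ===== LEMMAS AND PROOFS =====

-- the per-name line A appends, as an Option
def optA (fields : List (String × List String)) (f : String) : Option String :=
  (pyDictGet? fields f).bind (fun vs =>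
    if vs ≠ [] then some ("- " ++ prettyOf f ++ ": " ++ PySem.Str.join "; " vs) else none)

-- the element B keeps for one fields entry (relative to an index list e)
def keptElem (e : List (String × (Int × String))) (kv : String × List String) : Option (Int × String × List String) :=
  (pyDictGet? e kv.1).bind (fun ip => if kv.2 ≠ [] then some (ip.1, ip.2, kv.2) else none)

-- the element the order-driven side produces at an index entry q, looking the name up in fields
def tgtElem (fields : List (String × List String)) (q : String × (Int × String)) : Option (Int × String × List String) :=
  (pyDictGet? fields q.1).bind (fun vs => if vs ≠ [] then some (q.2.1, q.2.2, vs) else none)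

def lineOf (t : Int × String × List String) : String := "- " ++ t.2.1 ++ ": " ++ PySem.Str.join "; " t.2.2

theorem flatMap_toList_eq_filterMap {α β : Type} (h : α → Option β) (l : List α) :
    l.flatMap (fun x => (h x).toList) = l.filterMap h := by
  induction l with
  | nil => rfl
  | cons x xs ih => cases hx : h x <;> simp [List.flatMap_cons, hx, ih]

theorem filterMap_cons_toList {α β : Type} (h : α → Option β) (x : α) (l : List α) :
    List.filterMap h (x :: l) = (h x).toList ++ List.filterMap h l := by
  cases hx : h x <;> simp [hx]

theorem pyDictGet?_cons {ν : Type} (k : String) (v : ν) (rest : List (String × ν)) (f : String) :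
    pyDictGet? ((k, v) :: rest) f = if k = f then some v else pyDictGet? rest f := by
  by_cases h : k = f
  · simp [pyDictGet?, List.find?, h]
  · have hb : (k == f) = false := by simp [h]
    simp [pyDictGet?, List.find?, hb, h]

theorem pyDictGet?_eq_none_of_not_mem {ν : Type} (rest : List (String × ν)) (k : String)
    (h : k ∉ rest.map Prod.fst) : pyDictGet? rest k = none := by
  induction rest with
  | nil => rfl
  | cons q t ih =>
      simp only [List.map_cons, List.mem_cons] at h
      rw [pyDictGet?_cons]
      have h1 : q.1 ≠ k := fun hc => h (Or.inl hc.symm)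
      have h2 : k ∉ t.map Prod.fst := fun hc => h (Or.inr hc)
      simp [h1, ih h2]

-- A's foldl over order = header ++ filterMap optA
theorem A_fold_eq (fields : List (String × List String)) (acc : List String) :
    rankOrder.foldl (fun acc f =>
      match pyDictGet? fields f with
      | some vs => if vs ≠ [] then acc ++ ["- " ++ prettyOf f ++ ": " ++ PySem.Str.join "; " vs] else acc
      | none => acc) acc = acc ++ rankOrder.filterMap (optA fields) := by
  rw [PySem.List.foldl_congr_mem (g := fun acc f => acc ++ (optA fields f).toList)]
  · rw [PySem.List.foldl_append_eq_flatMap, flatMap_toList_eq_filterMap]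
  · intro a f _
    cases h : pyDictGet? fields f with
    | none => simp [optA, h]
    | some vs => by_cases hv : vs = [] <;> simp [optA, h, hv]

-- B's kept-building foldl = filterMap keptElem
theorem B_kept_eq (fields : List (String × List String)) (acc : List (Int × String × List String)) :
    fields.foldl (fun acc kv =>
      match pyDictGet? rankIndex kv.1 with
      | some ip => if kv.2 ≠ [] then acc ++ [(ip.1, ip.2, kv.2)] else acc
      | none => acc) acc = acc ++ fields.filterMap (keptElem rankIndex) := by
  rw [PySem.List.foldl_congr_mem (g := fun acc kv => acc ++ (keptElem rankIndex kv).toList)]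
  · rw [PySem.List.foldl_append_eq_flatMap, flatMap_toList_eq_filterMap]
  · intro a kv _
    cases h : pyDictGet? rankIndex kv.1 with
    | none => simp [keptElem, h]
    | some ip => by_cases hv : kv.2 = [] <;> simp [keptElem, h, hv]

-- mapping lineOf over the order-driven target gives exactly A's lines
theorem target_map_lineOf (fields : List (String × List String)) :
    ∀ (xs : List String) (s : Int),
      (((PySem.List.enumerate xs s).map (fun p => (p.2, (p.1, prettyOf p.2)))).filterMap
        (tgtElem fields)).map lineOf = xs.filterMap (optA fields) := by
  intro xs
  induction xs with
  | nil => intro s; rfl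
  | cons x t ih =>
      intro s
      rw [PySem.List.enumerate_cons]
      simp only [List.map_cons]
      rw [filterMap_cons_toList, filterMap_cons_toList (optA fields), List.map_append, ih (s + 1)]
      congr 1
      cases h : pyDictGet? fields x with
      | none => simp [tgtElem, optA, h]
      | some vs => by_cases hv : vs = [] <;> simp [tgtElem, optA, h, hv, lineOf]

-- the order-driven target is strictly increasing in its position component
theorem target_pairwise (fields : List (String × List String)) :
    (rankIndex.filterMap (tgtElem fields)).Pairwise (fun a b => a.1 < b.1) := by
  unfold rankIndex
  rw [List.filterMap_map]
  rw [List.pairwise_filterMap]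
  have h := PySem.List.pairwise_lt_enumerate rankOrder 0
  refine h.imp ?_
  intro p q hpq b hb b' hb'
  have hb1 : b.1 = p.1 := by
    simp only [Function.comp_apply, tgtElem, Option.bind_eq_some_iff] at hb
    obtain ⟨vs, _, hif⟩ := hb
    split at hif
    · cases hif; rfl
    · cases hif
  have hb1' : b'.1 = q.1 := by
    simp only [Function.comp_apply, tgtElem, Option.bind_eq_some_iff] at hb'
    obtain ⟨vs, _, hif⟩ := hb'
    split at hif
    · cases hif; rfl
    · cases hif
  rw [hb1, hb1']; exact hpq

-- one cons step on fields, pushed through the order-driven filterMap (needs unique index names)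
theorem perm_step (k : String) (v : List String) (rest : List (String × List String))
    (hrest : pyDictGet? rest k = none) :
    ∀ (e : List (String × (Int × String))), (e.map Prod.fst).Nodup →
      (e.filterMap (tgtElem ((k, v) :: rest))).Perm
        ((keptElem e (k, v)).toList ++ e.filterMap (tgtElem rest)) := by
  intro e
  induction e with
  | nil => intro _; simp [keptElem, pyDictGet?]
  | cons q t ih =>
      intro hnd
      obtain ⟨qn, qi⟩ := q
      simp only [List.map_cons, List.nodup_cons] at hnd
      obtain ⟨hq, hndt⟩ := hnd
      by_cases hqk : qn = k
      · -- q is the index entry for k: it produces exactly keptElem, and k occurs nowhere else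
        have htq : tgtElem ((k, v) :: rest) (qn, qi) = keptElem ((qn, qi) :: t) (k, v) := by
          simp [tgtElem, keptElem, pyDictGet?_cons, hqk]
        have htq2 : tgtElem rest (qn, qi) = none := by
          simp [tgtElem, hqk, hrest]
        have hcongr : t.filterMap (tgtElem ((k, v) :: rest)) = t.filterMap (tgtElem rest) := by
          apply List.filterMap_congr
          intro x hx
          have hxk : x.1 ≠ k := by
            intro hc
            apply hq
            have : x.1 ∈ List.map Prod.fst t := List.mem_map_of_mem hx
            simpa [hc, hqk] using this
          simp [tgtElem, pyDictGet?_cons, Ne.symm hxk]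
        rw [filterMap_cons_toList, filterMap_cons_toList, htq, htq2, hcongr]
        simp
      · -- q is an index entry for some other name: its contribution is unchanged
        have htq : tgtElem ((k, v) :: rest) (qn, qi) = tgtElem rest (qn, qi) := by
          simp [tgtElem, pyDictGet?_cons, Ne.symm hqk]
        have hke : keptElem ((qn, qi) :: t) (k, v) = keptElem t (k, v) := by
          simp [keptElem, pyDictGet?_cons, hqk]
        rw [filterMap_cons_toList, filterMap_cons_toList, htq, hke]
        refine ((ih hndt).append_left _).trans ?_
        rw [← List.append_assoc, ← List.append_assoc]
        exact (List.perm_append_comm).append_right _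

-- B's kept list is a permutation of the order-driven target
theorem kept_perm_target (fields : List (String × List String))
    (hf : (fields.map Prod.fst).Nodup) :
    (fields.filterMap (keptElem rankIndex)).Perm (rankIndex.filterMap (tgtElem fields)) := by
  have hnd : (rankIndex.map Prod.fst).Nodup := by decide
  induction fields with
  | nil =>
      simp only [List.filterMap_nil]
      have : rankIndex.filterMap (tgtElem ([] : List (String × List String))) = [] := by
        apply List.filterMap_eq_nil_iff.mpr
        intro q _
        simp [tgtElem, pyDictGet?]
      rw [this]
  | cons kv rest ih =>
      simp only [List.map_cons, List.nodup_cons] at hf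
      obtain ⟨hk, hfr⟩ := hf
      have hrest : pyDictGet? rest kv.1 = none := pyDictGet?_eq_none_of_not_mem rest kv.1 hk
      rw [filterMap_cons_toList]
      exact ((ih hfr).append_left _).trans (perm_step kv.1 kv.2 rest hrest rankIndex hnd).symm

-- B's emitting foldl is a map
theorem B_lines_eq (kept : List (Int × String × List String)) (acc : List String) :
    kept.foldl (fun acc t => acc ++ ["- " ++ t.2.1 ++ ": " ++ PySem.Str.join "; " t.2.2]) acc
      = acc ++ kept.map lineOf :=
  PySem.List.foldl_append_singleton_eq_map lineOf kept acc

-- ===== VERDICT (by name: the statement is the Claim_ definition above) =====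
theorem render_rank_summary_py_spec : Claim_equal_render_rank_summary_py := by
  intro rank_label fields _ hpre
  unfold Spec_render_rank_summary_py render_rank_summary_py render_rank_summary_py_alt
  by_cases hf : fields = []
  · simp [hf]
  · simp only [hf, reduceIte]
    rw [A_fold_eq, B_kept_eq, List.nil_append, B_lines_eq]
    have hsorted : PySem.List.sorted (fields.filterMap (keptElem rankIndex)) (fun t => t.1)
        = rankIndex.filterMap (tgtElem fields) :=
      PySem.List.sorted_eq_of_perm_of_pairwise_lt _ _ _
        (kept_perm_target fields hpre).symm (target_pairwise fields)
    rw [hsorted]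
    have hmap : (rankIndex.filterMap (tgtElem fields)).map lineOf
        = rankOrder.filterMap (optA fields) := target_map_lineOf fields rankOrder 0
    rw [hmap]
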